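-- pv_equiv track=rewrite | github.com/drewman1918/core15-survey | app.py | create_themes_for_frustrations
-- ===== SOURCE A (Python) =====
-- def create_themes_for_frustrations(responses: list[str]) -> dict[str, list[str]]:
--     """Group frustration responses into themes based on keywords and patterns."""
--     if not responses:
--         return {}
--
--     # Define theme keywords based on common leadership development frustrations
--     themes = {
--         "Time constraints": ["time", "busy", "schedule", "hours", "workload", "overwhelmed", "no time", "don't have time", "lack of time"],
--         "Lack of feedback/guidance": ["feedback", "guidance", "mentor", "coach", "direction", "advice", "support", "help", "don't know how", "unsure how"],
--         "Cost/money": ["cost", "expensive", "money", "price", "afford", "budget", "financial", "pay", "paid"],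
--         "Not seeing progress/results": ["progress", "results", "improvement", "change", "see results", "measurable", "outcomes", "impact"],
--         "Lack of accountability/motivation": ["accountability", "motivation", "discipline", "consistency", "stick with", "follow through", "commitment"],
--         "Content not relevant/applicable": ["relevant", "applicable", "practical", "real-world", "useful", "actionable", "relatable"],
--         "Information overload/too much": ["overwhelming", "too much", "information overload", "complex", "complicated", "confusing"],
--         "Lack of resources/tools": ["resources", "tools", "access", "available", "options", "programs", "platforms"],
--         "Organizational/systemic barriers": ["company", "organization", "employer", "system", "culture", "politics", "structure", "management"],
--         "Self-doubt/confidence": ["confidence", "self-doubt", "imposter", "worthy", "capable", "qualified", "deserve"],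
--     }
--
--     # Categorize responses
--     categorized = {theme: [] for theme in themes.keys()}
--     uncategorized = []
--
--     for response in responses:
--         response_lower = response.lower()
--         categorized_flag = False
--
--         # Check each theme's keywords
--         for theme, keywords in themes.items():
--             if any(keyword in response_lower for keyword in keywords):
--                 categorized[theme].append(response)
--                 categorized_flag = True
--                 break
--
--         if not categorized_flag:
--             uncategorized.append(response)
--
--     # Only return themes that have responses
--     result = {theme: responses for theme, responses in categorized.items() if responses}
--     if uncategorized:
--         result["Other/Uncategorized"] = uncategorized
--
--     return result
-- ===== SOURCE B (Python) =====
-- def create_themes_for_frustrations(responses: list[str]) -> dict[str, list[str]]: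
--     """Group frustration responses into themes based on keywords and patterns."""
--     if not responses:
--         return {}
--
--     themes = [
--         ("Time constraints", ["time", "busy", "schedule", "hours", "workload", "overwhelmed", "no time", "don't have time", "lack of time"]),
--         ("Lack of feedback/guidance", ["feedback", "guidance", "mentor", "coach", "direction", "advice", "support", "help", "don't know how", "unsure how"]),
--         ("Cost/money", ["cost", "expensive", "money", "price", "afford", "budget", "financial", "pay", "paid"]),
--         ("Not seeing progress/results", ["progress", "results", "improvement", "change", "see results", "measurable", "outcomes", "impact"]),
--         ("Lack of accountability/motivation", ["accountability", "motivation", "discipline", "consistency", "stick with", "follow through", "commitment"]),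
--         ("Content not relevant/applicable", ["relevant", "applicable", "practical", "real-world", "useful", "actionable", "relatable"]),
--         ("Information overload/too much", ["overwhelming", "too much", "information overload", "complex", "complicated", "confusing"]),
--         ("Lack of resources/tools", ["resources", "tools", "access", "available", "options", "programs", "platforms"]),
--         ("Organizational/systemic barriers", ["company", "organization", "employer", "system", "culture", "politics", "structure", "management"]),
--         ("Self-doubt/confidence", ["confidence", "self-doubt", "imposter", "worthy", "capable", "qualified", "deserve"]),
--     ]
--
--     lowered = [r.lower() for r in responses]
--     claimed = set()
--     result = {}
--
--     # Outer loop over themes in priority order; each theme claims the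
--     # still-unclaimed responses that mention one of its keywords.
--     for name, keywords in themes:
--         matched = []
--         for i, (resp, low) in enumerate(zip(responses, lowered)):
--             if i not in claimed and any(k in low for k in keywords):
--                 matched.append(resp)
--                 claimed.add(i)
--         if matched:
--             result[name] = matched
--
--     leftovers = [r for i, r in enumerate(responses) if i not in claimed]
--     if leftovers:
--         result["Other/Uncategorized"] = leftovers
--     return result
-- ===== Notes on version B (the rewrite author's own statement) =====
-- stated objective: alternative
-- what changed: Inverted the loop nesting: instead of scanning themes per response with a break, B loops over themes in priority order, each theme claiming still-unclaimed responses by index into a claimed set, then gathers unclaimed indices as uncategorized.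
import Mathlib
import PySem

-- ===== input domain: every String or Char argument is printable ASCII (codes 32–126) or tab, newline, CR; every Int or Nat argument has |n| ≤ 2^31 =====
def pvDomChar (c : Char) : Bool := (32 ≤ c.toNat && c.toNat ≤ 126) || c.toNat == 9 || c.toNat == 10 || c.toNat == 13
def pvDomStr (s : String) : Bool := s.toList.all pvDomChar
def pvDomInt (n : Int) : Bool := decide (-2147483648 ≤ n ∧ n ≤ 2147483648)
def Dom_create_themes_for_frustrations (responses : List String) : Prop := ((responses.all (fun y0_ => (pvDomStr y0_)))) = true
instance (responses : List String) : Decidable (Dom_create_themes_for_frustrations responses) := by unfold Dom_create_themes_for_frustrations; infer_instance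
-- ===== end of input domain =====

-- B inverts the loop nesting (outer loop over themes claiming responses by index) instead of
-- A's per-response scan over themes; objective: alternative decomposition, same exact output.

-- The fixed keyword table (shared data of both programs).
def pvThemes : List (String × List String) :=
  [ ("Time constraints", ["time", "busy", "schedule", "hours", "workload", "overwhelmed", "no time", "don't have time", "lack of time"]),
    ("Lack of feedback/guidance", ["feedback", "guidance", "mentor", "coach", "direction", "advice", "support", "help", "don't know how", "unsure how"]),
    ("Cost/money", ["cost", "expensive", "money", "price", "afford", "budget", "financial", "pay", "paid"]),
    ("Not seeing progress/results", ["progress", "results", "improvement", "change", "see results", "measurable", "outcomes", "impact"]),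
    ("Lack of accountability/motivation", ["accountability", "motivation", "discipline", "consistency", "stick with", "follow through", "commitment"]),
    ("Content not relevant/applicable", ["relevant", "applicable", "practical", "real-world", "useful", "actionable", "relatable"]),
    ("Information overload/too much", ["overwhelming", "too much", "information overload", "complex", "complicated", "confusing"]),
    ("Lack of resources/tools", ["resources", "tools", "access", "available", "options", "programs", "platforms"]),
    ("Organizational/systemic barriers", ["company", "organization", "employer", "system", "culture", "politics", "structure", "management"]),
    ("Self-doubt/confidence", ["confidence", "self-doubt", "imposter", "worthy", "capable", "qualified", "deserve"]) ]

-- any(keyword in response_lower for keyword in keywords)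
def pvKwMatch (kws : List String) (rl : String) : Bool := kws.any (fun kw => PySem.Str.isIn kw rl)

-- ===== PORT A =====
-- A's inner 'for theme, keywords in themes.items(): … break' loop; the dict 'categorized'
-- (fixed distinct keys) is its items list, 'categorized[theme].append' is in-place update.
def pvAInner (rl resp : String) (cat : List (String × List String)) :
    List (String × List String) → List (String × List String) × Bool
  | [] => (cat, false)
  | (t, kws) :: rest =>
      if pvKwMatch kws rl then
        (cat.map (fun q => if q.1 == t then (q.1, q.2 ++ [resp]) else q), true)
      else pvAInner rl resp cat rest

def pvAStep (st : List (String × List String) × List String) (resp : String) :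
    List (String × List String) × List String :=
  let rl := PySem.Str.lower resp
  let r := pvAInner rl resp st.1 pvThemes
  if r.2 then (r.1, st.2) else (r.1, st.2 ++ [resp])

def create_themes_for_frustrations (responses : List String) : List (String × List String) :=
  if responses.isEmpty then []
  else
    let st := responses.foldl pvAStep (pvThemes.map (fun p => (p.1, ([] : List String))), [])
    let result := st.1.filter (fun p => !p.2.isEmpty)
    if st.2.isEmpty then result else result ++ [("Other/Uncategorized", st.2)]

-- ===== PORT B =====
-- B: outer loop over themes; each theme scans enumerate(zip(responses, lowered)) and claims
-- still-unclaimed indices ('claimed' is a Python set of ints).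
def pvBScanStep (kws : List String) (acc : List String × PySem.Set Int) (q : Int × (String × String)) :
    List String × PySem.Set Int :=
  if !(PySem.Set.contains acc.2 q.1) && pvKwMatch kws q.2.2 then
    (acc.1 ++ [q.2.1], PySem.Set.add acc.2 q.1)
  else acc

def pvBThemeStep (pairs : List (Int × (String × String)))
    (st : PySem.Set Int × List (String × List String)) (p : String × List String) :
    PySem.Set Int × List (String × List String) :=
  let m := pairs.foldl (pvBScanStep p.2) ([], st.1)
  if m.1.isEmpty then (m.2, st.2) else (m.2, st.2 ++ [(p.1, m.1)])

def create_themes_for_frustrations_alt (responses : List String) : List (String × List String) :=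
  if responses.isEmpty then []
  else
    let lowered := responses.map PySem.Str.lower
    let pairs := PySem.List.enumerate (responses.zip lowered)
    let st := pvThemes.foldl (pvBThemeStep pairs) (PySem.Set.empty, [])
    let leftovers := ((PySem.List.enumerate responses).filter
        (fun q => !(PySem.Set.contains st.1 q.1))).map (·.2)
    if leftovers.isEmpty then st.2 else st.2 ++ [("Other/Uncategorized", leftovers)]

-- ===== PRECONDITION & SPEC =====
def Spec_create_themes_for_frustrations (responses : List String) (out : List (String × List String)) : Prop := out = create_themes_for_frustrations_alt responses
instance (responses : List String) (out : List (String × List String)) : Decidable (Spec_create_themes_for_frustrations responses out) := by unfold Spec_create_themes_for_frustrations; infer_instance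

-- ===== CLAIM (what is proved, stated in full; the proofs are below) =====
def Claim_equal_create_themes_for_frustrations : Prop := ∀ (responses : List String), Dom_create_themes_for_frustrations responses → Spec_create_themes_for_frustrations responses (create_themes_for_frustrations responses)

-- ===== LEMMAS AND PROOFS =====

-- first theme (by name) whose keyword list matches rl
def pvFta (rl : String) : List (String × List String) → Option String
  | [] => none
  | p :: rest => if pvKwMatch p.2 rl then some p.1 else pvFta rl rest

def pvGrp (L : List String) (t : String) : List String :=
  L.filter (fun r => pvFta (PySem.Str.lower r) pvThemes == some t)

def pvUnc (L : List String) : List String :=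
  L.filter (fun r => (pvFta (PySem.Str.lower r) pvThemes).isNone)

def pvOut (L : List String) : List (String × List String) :=
  (pvThemes.map (fun p => (p.1, pvGrp L p.1))).filter (fun p => !p.2.isEmpty)
    ++ (if (pvUnc L).isEmpty then [] else [("Other/Uncategorized", pvUnc L)])

lemma pvAInner_eq (tbl : List (String × List String)) (rl resp : String)
    (cat : List (String × List String)) :
    pvAInner rl resp cat tbl =
      match pvFta rl tbl with
      | none => (cat, false)
      | some t => (cat.map (fun q => if q.1 == t then (q.1, q.2 ++ [resp]) else q), true) := by
  induction tbl with
  | nil => rfl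
  | cons p rest ih =>
    obtain ⟨t, kws⟩ := p
    simp only [pvAInner, pvFta]
    split <;> simp [ih]

lemma pvAInner_eq_none (tbl : List (String × List String)) (rl resp : String)
    (cat : List (String × List String)) (h : pvFta rl tbl = none) :
    pvAInner rl resp cat tbl = (cat, false) := by
  rw [pvAInner_eq, h]

lemma pvAInner_eq_some (tbl : List (String × List String)) (rl resp : String)
    (cat : List (String × List String)) (t : String) (h : pvFta rl tbl = some t) :
    pvAInner rl resp cat tbl
      = (cat.map (fun q => if q.1 == t then (q.1, q.2 ++ [resp]) else q), true) := by
  rw [pvAInner_eq, h]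

lemma pvFoldA (L M : List String) :
    L.foldl pvAStep (pvThemes.map (fun p => (p.1, pvGrp M p.1)), pvUnc M)
      = (pvThemes.map (fun p => (p.1, pvGrp (M ++ L) p.1)), pvUnc (M ++ L)) := by
  induction L generalizing M with
  | nil => simp
  | cons r L ih =>
    have hstep : pvAStep (pvThemes.map (fun p => (p.1, pvGrp M p.1)), pvUnc M) r
        = (pvThemes.map (fun p => (p.1, pvGrp (M ++ [r]) p.1)), pvUnc (M ++ [r])) := by
      simp only [pvAStep]
      cases hf : pvFta (PySem.Str.lower r) pvThemes with
      | none =>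
        rw [pvAInner_eq_none _ _ _ _ hf]
        rw [if_neg (by simp), Prod.mk.injEq]
        constructor
        · apply List.map_congr_left
          intro p _
          simp [pvGrp, List.filter_append, hf]
        · simp [pvUnc, List.filter_append, hf]
      | some t =>
        rw [pvAInner_eq_some _ _ _ _ _ hf]
        rw [if_pos (by simp), Prod.mk.injEq]
        constructor
        · rw [List.map_map]
          apply List.map_congr_left
          intro p _
          by_cases hpt : p.1 = t
          · simp [pvGrp, List.filter_append, hf, hpt]
          · simp [pvGrp, List.filter_append, hf, hpt, Ne.symm hpt]
        · simp [pvUnc, List.filter_append, hf]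
    rw [List.foldl_cons, hstep, ih (M ++ [r])]
    have hM : (M ++ [r]) ++ L = M ++ r :: L := by simp
    rw [hM]

lemma pvA_eq_out (L : List String) : create_themes_for_frustrations L = pvOut L := by
  by_cases hL : L.isEmpty = true
  · rw [List.isEmpty_iff.mp hL]
    rfl
  · simp only [create_themes_for_frustrations, hL]
    have h0 : List.foldl pvAStep (pvThemes.map (fun p => (p.1, ([] : List String))), ([] : List String)) L
        = (pvThemes.map (fun p => (p.1, pvGrp L p.1)), pvUnc L) := pvFoldA L []
    rw [h0]
    simp only [pvOut]
    by_cases hU : (pvUnc L).isEmpty = true <;> simp [hU]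

-- B-side
def pvPairs (L : List String) : List (Int × (String × String)) :=
  PySem.List.enumerate (L.zip (L.map PySem.Str.lower))

lemma pvScan (kws : List String) :
    ∀ (ps : List (Int × (String × String))) (C : List Int) (acc : List String),
      (ps.map (·.1)).Nodup →
      ps.foldl (pvBScanStep kws) (acc, C)
        = (acc ++ (ps.filter (fun q => !(PySem.Set.contains C q.1) && pvKwMatch kws q.2.2)).map (·.2.1),
           C ++ (ps.filter (fun q => !(PySem.Set.contains C q.1) && pvKwMatch kws q.2.2)).map (·.1)) := by
  intro ps
  induction ps with
  | nil => intro C acc _; simp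
  | cons q rest ih =>
    intro C acc h
    simp only [List.map_cons, List.nodup_cons] at h
    obtain ⟨hq1, hrest⟩ := h
    have hcongr : ∀ C' : List Int, (∀ q' ∈ rest, PySem.Set.contains C' q'.1 = PySem.Set.contains C q'.1) →
        rest.filter (fun q' => !(PySem.Set.contains C' q'.1) && pvKwMatch kws q'.2.2)
          = rest.filter (fun q' => !(PySem.Set.contains C q'.1) && pvKwMatch kws q'.2.2) := by
      intro C' hC'
      apply List.filter_congr
      intro q' hq'
      rw [hC' q' hq']
    simp only [List.foldl_cons, List.filter_cons]
    by_cases hc : (!(PySem.Set.contains C q.1) && pvKwMatch kws q.2.2) = true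
    · obtain ⟨h1, h2⟩ := Bool.and_eq_true_iff.mp hc
      have hnotin : PySem.Set.contains C q.1 = false := by simpa using h1
      have hmem : q.1 ∉ C := by
        intro hm
        rw [← PySem.Set.contains_iff] at hm
        rw [hnotin] at hm
        exact Bool.false_ne_true hm
      have hstep : pvBScanStep kws (acc, C) q = (acc ++ [q.2.1], C ++ [q.1]) := by
        simp [pvBScanStep, PySem.Set.add, hmem, h2]
      rw [hstep, ih (C ++ [q.1]) (acc ++ [q.2.1]) hrest]
      have hsame : ∀ q' ∈ rest, PySem.Set.contains (C ++ [q.1]) q'.1 = PySem.Set.contains C q'.1 := by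
        intro q' hq'
        have hne2 : q'.1 ≠ q.1 := fun e => hq1 (e ▸ List.mem_map_of_mem hq')
        simp only [PySem.Set.contains_eq_listContains]
        simp
        exact fun e => absurd e hne2
      rw [hcongr _ hsame]
      simp [hmem, h2]
    · have hstep : pvBScanStep kws (acc, C) q = (acc, C) := by
        simp only [pvBScanStep]
        rw [if_neg hc]
      rw [hstep, ih C acc hrest]
      have hc' : ¬(q.1 ∉ C ∧ pvKwMatch kws q.2.2 = true) :=
        fun hp => hc (by simp [PySem.Set.contains_eq_listContains, hp.1, hp.2])
      simp [hc']

lemma pvNamesNodup : (pvThemes.map (·.1)).Nodup := by decide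

lemma pvFta_append (rl : String) (X Y : List (String × List String)) :
    pvFta rl (X ++ Y) = (pvFta rl X).or (pvFta rl Y) := by
  induction X with
  | nil => simp [pvFta]
  | cons p rest ih =>
    simp only [List.cons_append, pvFta]
    split <;> simp [ih]

lemma pvFta_mem (rl : String) (tbl : List (String × List String)) (t : String)
    (h : pvFta rl tbl = some t) : t ∈ tbl.map (·.1) := by
  induction tbl with
  | nil => simp [pvFta] at h
  | cons p rest ih =>
    simp only [pvFta] at h
    split at h
    · simp at h; simp [h]
    · simpa using Or.inr (ih h)

lemma pvFta_eq_some_iff (P R' : List (String × List String)) (p : String × List String)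
    (h : pvThemes = P ++ p :: R') (rl : String) :
    (pvFta rl pvThemes == some p.1) = ((pvFta rl P).isNone && pvKwMatch p.2 rl) := by
  have hn := pvNamesNodup
  rw [h] at hn
  simp only [List.map_append, List.map_cons, List.nodup_append, List.nodup_cons] at hn
  obtain ⟨-, ⟨hpr, -⟩, hdisj⟩ := hn
  have hpP : p.1 ∉ P.map (·.1) := fun hm => hdisj p.1 hm p.1 (by simp) rfl
  rw [h, pvFta_append]
  cases hP : pvFta rl P with
  | some t0 =>
    have ht0 : t0 ∈ P.map (·.1) := pvFta_mem rl P t0 hP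
    have : t0 ≠ p.1 := fun e => hpP (e ▸ ht0)
    simp [Option.or, this]
  | none =>
    simp only [Option.or, Option.isNone_none, Bool.true_and]
    show (pvFta rl (p :: R') == some p.1) = pvKwMatch p.2 rl
    simp only [pvFta]
    split
    · simp [*]
    · rename_i hm
      cases hR : pvFta rl R' with
      | none => simp [hm]
      | some t1 =>
        have ht1 : t1 ∈ R'.map (·.1) := pvFta_mem rl R' t1 hR
        have : t1 ≠ p.1 := fun e => hpr (e ▸ ht1)
        simp [hm, this]

lemma pvPairs_fst_nodup (L : List String) : ((pvPairs L).map (·.1)).Nodup := by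
  exact List.Pairwise.map _ (fun _ _ hab => Int.ne_of_lt hab) (PySem.List.pairwise_lt_enumerate _ _)

lemma pvEnumZip_filter_map : ∀ (L : List String) (s : Int) (c : String → Bool),
    (((PySem.List.enumerate (L.zip (L.map PySem.Str.lower)) s).filter (fun q => c q.2.2)).map (·.2.1))
      = L.filter (fun r => c (PySem.Str.lower r)) := by
  intro L
  induction L with
  | nil => intro s c; rfl
  | cons x xs ih =>
    intro s c
    simp only [List.map_cons, List.zip_cons_cons, PySem.List.enumerate_cons, List.filter_cons]
    split <;> simp [ih]

lemma pvPairs_filter_map (L : List String) (c : String → Bool) :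
    (((pvPairs L).filter (fun q => c q.2.2)).map (·.2.1)) = L.filter (fun r => c (PySem.Str.lower r)) := by
  exact pvEnumZip_filter_map L 0 c

lemma pvEnumFilterSnd : ∀ (L : List String) (s : Int) (c : String → Bool),
    (((PySem.List.enumerate L s).filter (fun q => c q.2)).map (·.2)) = L.filter c := by
  intro L
  induction L with
  | nil => intro s c; rfl
  | cons x xs ih =>
    intro s c
    simp only [PySem.List.enumerate_cons, List.filter_cons]
    split <;> simp [ih]

lemma pvFoldB (L : List String) :
    ∀ (R P : List (String × List String)) (C : List Int) (res : List (String × List String)),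
      pvThemes = P ++ R → C.Nodup →
      (∀ q ∈ pvPairs L, (q.1 ∈ C ↔ (pvFta q.2.2 P).isSome = true)) →
      (R.foldl (pvBThemeStep (pvPairs L)) (C, res)).2
          = res ++ (R.map (fun p => (p.1, pvGrp L p.1))).filter (fun x => !x.2.isEmpty)
        ∧ ∀ q ∈ pvPairs L,
            (q.1 ∈ (R.foldl (pvBThemeStep (pvPairs L)) (C, res)).1
              ↔ (pvFta q.2.2 pvThemes).isSome = true) := by
  intro R
  induction R with
  | nil =>
    intro P C res hPR hnd hC
    constructor
    · simp
    · intro q hq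
      have hP : P = pvThemes := by simpa using hPR.symm
      simpa [← hP] using hC q hq
  | cons p R' ih =>
    intro P C res hPR hnd hC
    have hPR' : pvThemes = (P ++ [p]) ++ R' := by simpa using hPR
    have hscan := pvScan p.2 (pvPairs L) C [] (pvPairs_fst_nodup L)
    have hkey : ∀ q ∈ pvPairs L,
        (!(PySem.Set.contains C q.1) && pvKwMatch p.2 q.2.2)
          = (pvFta q.2.2 pvThemes == some p.1) := by
      intro q hq
      rw [pvFta_eq_some_iff P R' p hPR]
      have hcc : PySem.Set.contains C q.1 = (pvFta q.2.2 P).isSome := by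
        rw [Bool.eq_iff_iff, PySem.Set.contains_iff, hC q hq]
      rw [hcc]
      cases pvFta q.2.2 P <;> simp
    have hfcond : (pvPairs L).filter (fun q => !(PySem.Set.contains C q.1) && pvKwMatch p.2 q.2.2)
        = (pvPairs L).filter (fun q => pvFta q.2.2 pvThemes == some p.1) :=
      List.filter_congr hkey
    have hm1 : ((pvPairs L).filter (fun q => !(PySem.Set.contains C q.1) && pvKwMatch p.2 q.2.2)).map (·.2.1)
        = pvGrp L p.1 := by
      rw [hfcond]
      exact pvPairs_filter_map L (fun s => pvFta s pvThemes == some p.1)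
    -- the new claimed indices
    have hfi_nodup : (((pvPairs L).filter (fun q => !(PySem.Set.contains C q.1) && pvKwMatch p.2 q.2.2)).map (·.1)).Nodup := by
      exact (pvPairs_fst_nodup L).sublist (List.filter_sublist.map _)
    have hfi_new : ∀ i ∈ ((pvPairs L).filter (fun q => !(PySem.Set.contains C q.1) && pvKwMatch p.2 q.2.2)).map (·.1), i ∉ C := by
      intro i hi
      obtain ⟨q', hq', rfl⟩ := List.mem_map.mp hi
      obtain ⟨hq'mem, hq'cond⟩ := List.mem_filter.mp hq'
      obtain ⟨hnc, -⟩ := Bool.and_eq_true_iff.mp hq'cond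
      intro hmem
      rw [← PySem.Set.contains_iff] at hmem
      rw [hmem] at hnc
      simp at hnc
    have hnd' : (C ++ ((pvPairs L).filter (fun q => !(PySem.Set.contains C q.1) && pvKwMatch p.2 q.2.2)).map (·.1)).Nodup := by
      rw [List.nodup_append]
      refine ⟨hnd, hfi_nodup, ?_⟩
      intro a ha b hb e
      exact hfi_new b hb (e ▸ ha)
    have hfi_mem : ∀ q ∈ pvPairs L,
        (q.1 ∈ ((pvPairs L).filter (fun q => !(PySem.Set.contains C q.1) && pvKwMatch p.2 q.2.2)).map (·.1)
          ↔ (pvFta q.2.2 pvThemes == some p.1) = true) := by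
      intro q hq
      rw [hfcond]
      constructor
      · intro hi
        obtain ⟨q', hq', he⟩ := List.mem_map.mp hi
        obtain ⟨hq'mem, hq'cond⟩ := List.mem_filter.mp hq'
        have : q' = q := List.inj_on_of_nodup_map (pvPairs_fst_nodup L) hq'mem hq he
        exact this ▸ hq'cond
      · intro hcond
        exact List.mem_map.mpr ⟨q, List.mem_filter.mpr ⟨hq, hcond⟩, rfl⟩
    have hC' : ∀ q ∈ pvPairs L,
        (q.1 ∈ C ++ ((pvPairs L).filter (fun q => !(PySem.Set.contains C q.1) && pvKwMatch p.2 q.2.2)).map (·.1)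
          ↔ (pvFta q.2.2 (P ++ [p])).isSome = true) := by
      intro q hq
      rw [List.mem_append, hC q hq, hfi_mem q hq, pvFta_eq_some_iff P R' p hPR, pvFta_append]
      cases pvFta q.2.2 P <;> cases hkw : pvKwMatch p.2 q.2.2 <;> simp [pvFta, hkw, Option.or]
    -- one outer step
    have hstep : pvBThemeStep (pvPairs L) (C, res) p
        = (C ++ ((pvPairs L).filter (fun q => !(PySem.Set.contains C q.1) && pvKwMatch p.2 q.2.2)).map (·.1),
           if (pvGrp L p.1).isEmpty then res else res ++ [(p.1, pvGrp L p.1)]) := by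
      simp only [pvBThemeStep]
      rw [hscan]
      simp only [List.nil_append]
      rw [hm1]
      split <;> rfl
    rw [List.foldl_cons, hstep]
    obtain ⟨ih1, ih2⟩ := ih (P ++ [p]) _ _ hPR' hnd' hC'
    refine ⟨?_, ih2⟩
    rw [ih1]
    by_cases hfe : (pvGrp L p.1).isEmpty = true
    · simp [hfe]
    · simp [hfe, List.append_assoc]

lemma pvB_eq_out (L : List String) : create_themes_for_frustrations_alt L = pvOut L := by
  by_cases hL : L.isEmpty = true
  · rw [List.isEmpty_iff.mp hL]
    rfl
  · simp only [create_themes_for_frustrations_alt, hL]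
    have hPairs : PySem.List.enumerate (L.zip (L.map PySem.Str.lower)) = pvPairs L := rfl
    rw [hPairs]
    have hC0 : ∀ q ∈ pvPairs L, (q.1 ∈ (PySem.Set.empty : PySem.Set Int) ↔ (pvFta q.2.2 []).isSome = true) := by
      intro q _
      simp [PySem.Set.empty, pvFta]
    obtain ⟨h1, h2⟩ := pvFoldB L pvThemes [] PySem.Set.empty [] (by simp) (by exact List.nodup_nil) hC0
    rw [h1]
    have hleft : ((PySem.List.enumerate L).filter
          (fun q => !(PySem.Set.contains (List.foldl (pvBThemeStep (pvPairs L)) (PySem.Set.empty, []) pvThemes).1 q.1))).map (·.2)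
        = pvUnc L := by
      rw [pvUnc, ← pvEnumFilterSnd L 0 (fun r => (pvFta (PySem.Str.lower r) pvThemes).isNone)]
      congr 1
      apply List.filter_congr
      intro q hq
      rw [PySem.List.mem_enumerate_iff] at hq
      obtain ⟨k, hk, rfl⟩ := hq
      have hk2 : k < (L.zip (L.map PySem.Str.lower)).length := by simpa using hk
      have hqq : ((0 + (k : Int), (L[k], PySem.Str.lower L[k])) : Int × (String × String)) ∈ pvPairs L := by
        rw [pvPairs, PySem.List.mem_enumerate_iff]
        exact ⟨k, hk2, by simp [List.getElem_zip]⟩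
      have hmem := h2 _ hqq
      cases hft : pvFta (PySem.Str.lower L[k]) pvThemes with
      | none =>
        rw [hft] at hmem
        simp only [Option.isSome_none, Bool.false_eq_true, iff_false] at hmem
        simp [PySem.Set.contains_eq_listContains]
        simpa using hmem
      | some t =>
        rw [hft] at hmem
        simp only [Option.isSome_some, iff_true] at hmem
        simp [PySem.Set.contains_eq_listContains]
        simpa using hmem
    rw [hleft]
    simp only [pvOut, List.nil_append]
    by_cases hU : (pvUnc L).isEmpty = true <;> simp [hU]

-- ===== VERDICT (by name: the statement is the Claim_ definition above) =====
theorem create_themes_for_frustrations_spec : Claim_equal_create_themes_for_frustrations := by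
  intro responses _
  unfold Spec_create_themes_for_frustrations
  rw [pvA_eq_out, pvB_eq_out]
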